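-- pv_equiv track=rewrite | github.com/huawei-csl/GENIAL | src/genial/experiment/encoding_distance.py | get_all_col_permuted_list
-- ===== SOURCE A (Python) =====
-- import itertools
--
-- def get_all_col_permuted_list(list1: list[str]):
--     # Transpose lists
--     list1_t = ["".join(column) for column in zip(*list1)]
--
--     # Get all permutations
--     all_list1 = list(
--         itertools.permutations(
--             list1_t,
--         )
--     )
--
--     # Transpose back
--     for idx in range(len(all_list1)):
--         all_list1[idx] = ["".join(column) for column in zip(*all_list1[idx])]
--
--     return all_list1
-- ===== SOURCE B (Python) =====
-- import itertools
--
-- def get_all_col_permuted_list(list1: list[str]):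
--     ncols = min((len(r) for r in list1), default=0)
--     if ncols == 0:
--         # zero columns: the single (empty) permutation, and its transpose has zero rows
--         return [[]]
--     return [
--         ["".join(row[j] for j in perm) for row in list1]
--         for perm in itertools.permutations(range(ncols))
--     ]
-- ===== Notes on version B (the rewrite author's own statement) =====
-- stated objective: simpler
-- what changed: B permutes column indices directly, joining row[j] per permutation in one comprehension, instead of A's transpose-to-column-strings / permute / transpose-back pipeline.
import Mathlib
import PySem

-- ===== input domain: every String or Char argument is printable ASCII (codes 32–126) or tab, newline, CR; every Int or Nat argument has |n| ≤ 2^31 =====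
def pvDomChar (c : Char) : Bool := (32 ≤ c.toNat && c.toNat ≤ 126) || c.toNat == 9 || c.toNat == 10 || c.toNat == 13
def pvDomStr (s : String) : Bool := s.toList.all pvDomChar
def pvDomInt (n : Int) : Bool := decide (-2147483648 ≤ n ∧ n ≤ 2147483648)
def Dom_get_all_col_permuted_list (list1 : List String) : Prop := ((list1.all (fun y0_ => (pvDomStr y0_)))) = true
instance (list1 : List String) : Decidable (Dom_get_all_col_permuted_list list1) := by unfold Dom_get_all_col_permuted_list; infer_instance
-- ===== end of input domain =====

-- B permutes column indices directly (one comprehension) instead of A's transpose / permute column-strings / transpose back; simpler, same cost.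

-- ===== PORT A =====
-- itertools.permutations in its exact order: at each step pick position i (left to right),
-- recurse on the list with position i removed; fuel = list length makes it structural (exact).
def pvPerms {α : Type} [Inhabited α] : Nat → List α → List (List α)
  | 0, _ => [[]]
  | Nat.succ n, xs =>
      (List.range xs.length).flatMap (fun i =>
        (pvPerms n (xs.eraseIdx i)).map (fun p => xs.getD i default :: p))

-- Python zip(*ls): truncates every list to the minimum length (exact, hand-ported).
def pvMinLen (ls : List (List Char)) : Nat :=
  match ls with
  | [] => 0
  | h :: t => t.foldl (fun m l => min m l.length) h.length

def pvZipT (ls : List (List Char)) : List (List Char) :=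
  (List.range (pvMinLen ls)).map (fun i => ls.map (fun l => l.getD i ' '))

def get_all_col_permuted_list (list1 : List String) : List (List String) :=
  -- list1_t = ["".join(column) for column in zip(*list1)] (strings as char lists; "".join = String.ofList)
  let list1_t : List (List Char) := pvZipT (list1.map String.toList)
  -- all permutations of the column strings, then transpose each back
  (pvPerms list1_t.length list1_t).map (fun q => (pvZipT q).map String.ofList)

-- ===== PORT B =====
def get_all_col_permuted_list_alt (list1 : List String) : List (List String) :=
  -- ncols = min((len(r) for r in list1), default=0)
  let ncols : Nat :=
    match list1 with
    | [] => 0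
    | h :: t => t.foldl (fun m r => min m r.toList.length) h.toList.length
  if ncols = 0 then [[]]
  else
    (pvPerms (List.range ncols).length (List.range ncols)).map (fun p =>
      list1.map (fun r => String.ofList (p.map (fun j => r.toList.getD j ' '))))

-- ===== PRECONDITION & SPEC =====
def Spec_get_all_col_permuted_list (list1 : List String) (out : List (List String)) : Prop :=
  out = get_all_col_permuted_list_alt list1
instance (list1 : List String) (out : List (List String)) : Decidable (Spec_get_all_col_permuted_list list1 out) := by
  unfold Spec_get_all_col_permuted_list; infer_instance

-- ===== CLAIM (what is proved, stated in full; the proofs are below) =====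
def Claim_equal_get_all_col_permuted_list : Prop := ∀ (list1 : List String), Dom_get_all_col_permuted_list list1 → Spec_get_all_col_permuted_list list1 (get_all_col_permuted_list list1)

-- ===== LEMMAS AND PROOFS =====

theorem perms_map_lemma {α β : Type} [Inhabited α] [Inhabited β] (f : α → β) :
    ∀ (n : Nat) (l : List α), n = l.length →
      pvPerms n (l.map f) = (pvPerms n l).map (List.map f) := by
  intro n
  induction n with
  | zero => intro l _; rfl
  | succ n ih =>
    intro l hl
    simp only [pvPerms, List.length_map, List.map_flatMap]
    refine List.flatMap_congr ?_
    intro i hi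
    have hil : i < l.length := List.mem_range.mp hi
    rw [List.eraseIdx_map, ih (l.eraseIdx i) (by rw [List.length_eraseIdx_of_lt hil]; omega)]
    simp only [List.map_map]
    refine List.map_congr_left ?_
    intro p _
    simp [List.getD_eq_getElem?_getD, List.getElem?_eq_getElem hil]

theorem getD_cons_eraseIdx_perm {α : Type} [Inhabited α] :
    ∀ (l : List α) (i : Nat), i < l.length → (l.getD i default :: l.eraseIdx i).Perm l := by
  intro l
  induction l with
  | nil => intro i h; simp at h
  | cons x t ih =>
    intro i h
    cases i with
    | zero => simp
    | succ i =>
      have h' : i < t.length := by simpa using h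
      have := ih i h'
      show ((x :: t).getD (i+1) default :: (x :: t).eraseIdx (i+1)).Perm (x :: t)
      have e : ((x :: t).getD (i+1) default :: (x :: t).eraseIdx (i+1))
          = (t.getD i default :: x :: t.eraseIdx i) := by simp [List.getD]
      rw [e]
      exact (List.Perm.swap x (t.getD i default) (t.eraseIdx i)).trans (List.Perm.cons x this)

theorem mem_perms_perm {α : Type} [Inhabited α] :
    ∀ (n : Nat) (l : List α) (p : List α), n = l.length → p ∈ pvPerms n l → p.Perm l := by
  intro n
  induction n with
  | zero =>
    intro l p hl hp
    simp [pvPerms] at hp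
    subst hp
    cases l with
    | nil => exact List.Perm.refl _
    | cons a t => simp at hl
  | succ n ih =>
    intro l p hl hp
    simp only [pvPerms, List.mem_flatMap, List.mem_map, List.mem_range] at hp
    obtain ⟨i, hi, q, hq, rfl⟩ := hp
    have hlen : n = (l.eraseIdx i).length := by rw [List.length_eraseIdx_of_lt hi]; omega
    exact ((ih _ q hlen hq).cons _).trans (getD_cons_eraseIdx_perm l i hi)

theorem foldl_min_const (n : Nat) :
    ∀ (t : List (List Char)), (∀ x ∈ t, x.length = n) →
      t.foldl (fun m l => min m l.length) n = n := by
  intro t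
  induction t with
  | nil => intro _; rfl
  | cons x t ih =>
    intro h
    have hx : x.length = n := h x (by simp)
    simp only [List.foldl_cons, hx, Nat.min_self]
    exact ih (fun y hy => h y (by simp [hy]))

theorem foldl_min_le_acc :
    ∀ (t : List (List Char)) (acc : Nat), t.foldl (fun m l => min m l.length) acc ≤ acc := by
  intro t
  induction t with
  | nil => intro acc; simp
  | cons x t ih =>
    intro acc
    simp only [List.foldl_cons]
    exact le_trans (ih (min acc x.length)) (Nat.min_le_left _ _)

theorem foldl_min_le_mem (x : List Char) :
    ∀ (t : List (List Char)) (acc : Nat), x ∈ t →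
      t.foldl (fun m l => min m l.length) acc ≤ x.length := by
  intro t
  induction t with
  | nil => intro acc h; simp at h
  | cons y t ih =>
    intro acc h
    rcases List.mem_cons.mp h with rfl | h
    · simp only [List.foldl_cons]
      exact le_trans (foldl_min_le_acc _ _) (Nat.min_le_right _ _)
    · exact ih _ h

theorem foldl_min_pos :
    ∀ (t : List (List Char)) (acc : Nat), 0 < acc → (∀ x ∈ t, x ≠ []) →
      0 < t.foldl (fun m l => min m l.length) acc := by
  intro t
  induction t with
  | nil => intro acc h _; simpa using h
  | cons x t ih =>
    intro acc hacc h
    have hx : x ≠ [] := h x (by simp)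
    have : 0 < x.length := List.length_pos_iff.mpr hx
    simp only [List.foldl_cons]
    exact ih _ (by omega) (fun y hy => h y (by simp [hy]))

theorem pvMinLen_const (n : Nat) (ls : List (List Char)) (hne : ls ≠ [])
    (h : ∀ x ∈ ls, x.length = n) : pvMinLen ls = n := by
  cases ls with
  | nil => exact absurd rfl hne
  | cons x t =>
    have hx : x.length = n := h x (by simp)
    simp only [pvMinLen, hx]
    exact foldl_min_const n t (fun y hy => h y (by simp [hy]))

theorem pvMinLen_pos (ls : List (List Char)) (hne : ls ≠ [])
    (h : ∀ x ∈ ls, x ≠ []) : 0 < pvMinLen ls := by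
  cases ls with
  | nil => exact absurd rfl hne
  | cons x t =>
    have hx : x ≠ [] := h x (by simp)
    exact foldl_min_pos t x.length (List.length_pos_iff.mpr hx) (fun y hy => h y (by simp [hy]))

theorem pvMinLen_le (ls : List (List Char)) (x : List Char) (hx : x ∈ ls) :
    pvMinLen ls ≤ x.length := by
  cases ls with
  | nil => simp at hx
  | cons y t =>
    rcases List.mem_cons.mp hx with rfl | hx
    · exact foldl_min_le_acc t x.length
    · exact foldl_min_le_mem x t y.length hx

-- B's ncols equals A's number of columns pvMinLen (list1.map String.toList)
theorem ncols_eq (h : String) (t : List String) :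
    t.foldl (fun m r => min m r.toList.length) h.toList.length
      = pvMinLen ((h :: t).map String.toList) := by
  simp [pvMinLen, List.foldl_map]

-- ===== VERDICT (by name: the statement is the Claim_ definition above) =====
theorem get_all_col_permuted_list_spec : Claim_equal_get_all_col_permuted_list := by
  intro list1 _
  show get_all_col_permuted_list list1 = get_all_col_permuted_list_alt list1
  cases list1 with
  | nil => rfl
  | cons h t =>
    by_cases hmem : ("" : String) ∈ (h :: t)
    · -- some row is empty: zero columns, both ports return [[]]
      have hm : pvMinLen ((h :: t).map String.toList) = 0 := by
        have : ([] : List Char) ∈ (h :: t).map String.toList :=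
          List.mem_map.mpr ⟨"", hmem, rfl⟩
        have := pvMinLen_le _ _ this
        simpa using this
      have hA : get_all_col_permuted_list (h :: t) = [[]] := by
        simp only [get_all_col_permuted_list, pvZipT, hm, List.range_zero, List.map_nil,
          List.length_nil]
        rfl
      have hB : get_all_col_permuted_list_alt (h :: t) = [[]] := by
        simp only [get_all_col_permuted_list_alt, ncols_eq, hm]
        rfl
      rw [hA, hB]
    · -- no empty row: at least one column
      have hne : ("" : String) ∉ (h :: t) := hmem
      set rows : List (List Char) := (h :: t).map String.toList with hrows
      have hallne : ∀ r ∈ rows, r ≠ [] := by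
        intro r hr
        rw [hrows] at hr
        obtain ⟨s, hs, rfl⟩ := List.mem_map.mp hr
        intro hnil
        exact hne (String.toList_eq_nil_iff.mp hnil ▸ hs)
      have hm : 0 < pvMinLen rows := pvMinLen_pos rows (by simp [hrows]) hallne
      -- unfold both ports
      simp only [get_all_col_permuted_list, get_all_col_permuted_list_alt, ncols_eq, ← hrows]
      set m := pvMinLen rows with hmdef
      rw [if_neg (by omega : ¬ m = 0)]
      set colFun : Nat → List Char := fun i => rows.map (fun l => l.getD i ' ') with hcol
      have hzip : pvZipT rows = (List.range m).map colFun := rfl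
      rw [hzip]
      rw [List.length_map, List.length_range,
          perms_map_lemma colFun m (List.range m) (by simp), List.map_map]
      refine List.map_congr_left ?_
      intro p hp
      have hperm : p.Perm (List.range m) := mem_perms_perm m (List.range m) p (by simp) hp
      have hplen : p.length = m := by simpa using hperm.length_eq
      have hpne : p ≠ [] := by
        intro hnilp
        rw [hnilp] at hplen
        simp at hplen
        omega
      -- the transposed-back block equals B's row block
      have hcollen : ∀ x ∈ p.map colFun, x.length = rows.length := by
        intro x hx
        obtain ⟨j, _, rfl⟩ := List.mem_map.mp hx
        simp [hcol]
      have hmin : pvMinLen (p.map colFun) = rows.length :=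
        pvMinLen_const rows.length _ (by simpa using hpne) hcollen
      show (pvZipT (p.map colFun)).map String.ofList
          = (h :: t).map (fun r => String.ofList (p.map (fun j => r.toList.getD j ' ')))
      rw [pvZipT, hmin]
      apply List.ext_getElem
      · simp [hrows]
      · intro i hi1 hi2
        have hirows : i < rows.length := by simpa [hrows] using hi2
        have hiht : i < (h :: t).length := by simpa [hrows] using hirows
        have hval : ∀ j : Nat,
            (colFun j).getD i ' ' = ((h :: t)[i]'hiht).toList.getD j ' ' := by
          intro j
          have hi' : i < (List.map (fun l => List.getD l j ' ') rows).length := by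
            simpa using hirows
          rw [hcol]
          rw [List.getD_eq_getElem _ _ hi']
          simp only [hrows, List.getElem_map, List.getD_eq_getElem?_getD]
        simp only [List.getElem_map, List.getElem_range, List.map_map, Function.comp]
        exact congrArg String.ofList (List.map_congr_left (fun j _ => hval j))
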